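-- pv_equiv track=rewrite | github.com/JaySalma/Python_Advent_of_Code | Day13_1.py | get_busses
-- ===== SOURCE A (Python) =====
-- def get_busses(input):
--     lines_raw=input[1]
--     line=""
--     bus_lines=[]
--     for char in lines_raw:
--         if char!="x" and char!=",":
--             line+=char
--         elif char=="," and line!="":
--             bus_lines.append(int(line))
--             line=""
--     next
--     if not line=="":
--         bus_lines.append(int(line))
--         line=""
--     return bus_lines
-- ===== SOURCE B (Python) =====
-- def get_busses(input):
--     cleaned = "".join(c for c in input[1] if c != "x")
--     return [int(p) for p in cleaned.split(",") if p != ""]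
-- ===== Notes on version B (the rewrite author's own statement) =====
-- stated objective: idiomatic
-- what changed: Replaces the character-by-character state machine (manual accumulator string with flush-on-comma logic) by a pipeline: delete every 'x' character, split the whole string on ',', and map int over the nonempty pieces.
import Mathlib
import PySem

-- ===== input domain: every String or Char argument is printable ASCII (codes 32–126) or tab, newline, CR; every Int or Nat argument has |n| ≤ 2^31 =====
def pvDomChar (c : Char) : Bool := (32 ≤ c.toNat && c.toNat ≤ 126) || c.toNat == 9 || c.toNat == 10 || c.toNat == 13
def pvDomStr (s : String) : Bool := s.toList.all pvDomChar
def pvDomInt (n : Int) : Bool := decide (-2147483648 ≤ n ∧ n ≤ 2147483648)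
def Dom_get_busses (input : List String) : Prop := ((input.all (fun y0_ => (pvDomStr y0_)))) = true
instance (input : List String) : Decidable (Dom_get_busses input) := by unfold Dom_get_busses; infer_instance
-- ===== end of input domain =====

-- B replaces A's character-by-character accumulator state machine by an idiomatic
-- filter-out-'x' / split-on-',' / map-int pipeline; same cost, proved equal wherever A returns.

-- ===== PORT A =====
-- one step of A's for-loop: state = (line, bus_lines)
def pvStepA (st : List Char × List Int) (c : Char) : List Char × List Int :=
  if c ≠ 'x' ∧ c ≠ ',' then (st.1 ++ [c], st.2)
  else if c = ',' ∧ st.1 ≠ [] then ([], st.2 ++ [(PySem.Int.ofChars? st.1).getD 0])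
  else st

def get_busses (input : List String) : List Int :=
  let lines_raw := ((PySem.List.pyGet? input 1).getD "").toList   -- input[1]; Pre_ guarantees it exists
  let st := lines_raw.foldl pvStepA ([], [])
  if st.1 ≠ [] then st.2 ++ [(PySem.Int.ofChars? st.1).getD 0] else st.2
  -- int(line) raising ValueError is excluded by Pre_; getD 0 is never reached inside Pre_

-- ===== PORT B =====
def get_busses_alt (input : List String) : List Int :=
  let s := ((PySem.List.pyGet? input 1).getD "").toList          -- input[1]
  let cleaned := PySem.Chars.join [] ((s.filter (fun c => c ≠ 'x')).map (fun c => [c]))  -- "".join(c for c in input[1] if c != "x")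
  ((PySem.Chars.splitOn cleaned [',']).filter (fun p => p ≠ [])).map
    (fun p => (PySem.Int.ofChars? p).getD 0)

-- ===== PRECONDITION & SPEC =====
-- Pre_ = exactly where Python A returns: input[1] must exist (else IndexError) and every
-- comma-separated token of input[1] with its 'x' characters removed must, when nonempty,
-- parse as a Python int (else int() raises ValueError).
def Pre_get_busses (input : List String) : Prop :=
  2 ≤ input.length ∧
  ∀ p ∈ PySem.Chars.splitOn (((PySem.List.pyGet? input 1).getD "").toList.filter (fun c => c ≠ 'x')) [','],
    p ≠ [] → (PySem.Int.ofChars? p).isSome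
instance (input : List String) : Decidable (Pre_get_busses input) := by unfold Pre_get_busses; infer_instance

def pvWitness_get_busses : List String := ["939", "7,13,x,x,59,x,31,19"]

def Spec_get_busses (input : List String) (out : List Int) : Prop := out = get_busses_alt input
instance (input : List String) (out : List Int) : Decidable (Spec_get_busses input out) := by unfold Spec_get_busses; infer_instance

-- ===== CLAIM (what is proved, stated in full; the proofs are below) =====
def Claim_equal_get_busses : Prop := ∀ (input : List String), Dom_get_busses input → Pre_get_busses input → Spec_get_busses input (get_busses input)

-- ===== LEMMAS AND PROOFS =====

-- reference single-char split on ',' (proof-only)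
def pvSpl : List Char → List (List Char)
  | [] => [[]]
  | c :: t => if c = ',' then [] :: pvSpl t else (pvSpl t).modifyHead (c :: ·)

theorem pvModifyHead_idfun (l : List (List Char)) :
    List.modifyHead (fun x => x) l = l := by cases l <;> simp

theorem pvSplitOn_go : ∀ (fuel : Nat) (l cur : List Char) (acc : List (List Char)),
    l.length < fuel →
    PySem.Chars.splitOn.go [','] fuel l cur acc
      = acc.reverse ++ (pvSpl l).modifyHead (cur.reverse ++ ·) := by
  intro fuel
  induction fuel with
  | zero => intro l cur acc h; omega
  | succ f ih =>
    intro l cur acc h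
    cases l with
    | nil => simp [PySem.Chars.splitOn.go, pvSpl]
    | cons c rest =>
      by_cases hc : c = ','
      · subst hc
        have hp : List.isPrefixOf [','] (',' :: rest) = true := by
          simp [List.isPrefixOf]
        simp only [PySem.Chars.splitOn.go, hp, if_true]
        rw [show List.drop [','].length (',' :: rest) = rest from rfl]
        rw [ih rest [] ((List.reverse cur) :: acc) (by simpa using Nat.lt_of_succ_lt_succ h)]
        simp [pvSpl, pvModifyHead_idfun]
      · have hp : List.isPrefixOf [','] (c :: rest) = false := by
          simp [List.isPrefixOf]; exact fun h' => hc (by simpa using h'.symm)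
        simp only [PySem.Chars.splitOn.go, hp, Bool.false_eq_true, if_false]
        rw [ih rest (c :: cur) acc (by simpa using Nat.lt_of_succ_lt_succ h)]
        simp only [pvSpl, if_neg hc, List.modifyHead_modifyHead, List.reverse_cons]
        have hfg : ((fun x => cur.reverse ++ x) ∘ fun x => c :: x)
            = fun x : List Char => cur.reverse ++ [c] ++ x := by
          funext x; simp
        rw [hfg]

theorem pvSplitOn_eq (cs : List Char) :
    PySem.Chars.splitOn cs [','] = pvSpl cs := by
  unfold PySem.Chars.splitOn
  rw [pvSplitOn_go cs.length.succ cs [] [] (Nat.lt_succ_self _)]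
  simp [pvModifyHead_idfun]

-- A's loop step is the identity on 'x'
theorem pvFoldA_filter : ∀ (cs : List Char) (st : List Char × List Int),
    cs.foldl pvStepA st = (cs.filter (fun c => c ≠ 'x')).foldl pvStepA st
  | [], _ => rfl
  | c :: t, st => by
    by_cases hc : c = 'x'
    · subst hc
      have : pvStepA st 'x' = st := by simp [pvStepA]
      simp [List.foldl, this, pvFoldA_filter t st]
    · simp [List.foldl, hc, pvFoldA_filter t (pvStepA st c)]

def pvFinish (st : List Char × List Int) : List Int :=
  if st.1 ≠ [] then st.2 ++ [(PySem.Int.ofChars? st.1).getD 0] else st.2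

theorem pvMain : ∀ (cs line : List Char) (acc : List Int), 'x' ∉ cs →
    pvFinish (cs.foldl pvStepA (line, acc))
      = acc ++ (((pvSpl cs).modifyHead (line ++ ·)).filter (fun p => p ≠ [])).map
          (fun p => (PySem.Int.ofChars? p).getD 0)
  | [], line, acc, _ => by
    by_cases hl : line = [] <;> simp [pvFinish, pvSpl, hl]
  | c :: t, line, acc, hx => by
    have hxc : c ≠ 'x' := fun h => hx (h ▸ List.mem_cons_self ..)
    have hxt : 'x' ∉ t := fun h => hx (List.mem_cons_of_mem _ h)
    by_cases hc : c = ','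
    · subst hc
      by_cases hl : line = []
      · subst hl
        have hstep : pvStepA ([], acc) ',' = ([], acc) := by simp [pvStepA]
        simp only [List.foldl, hstep, pvMain t [] acc hxt, pvSpl, if_true,
          List.modifyHead_cons, List.nil_append]
        simp [pvModifyHead_idfun]
      · have hstep : pvStepA (line, acc) ','
            = ([], acc ++ [(PySem.Int.ofChars? line).getD 0]) := by
          simp [pvStepA, hl]
        simp only [List.foldl, hstep, pvMain t [] _ hxt, pvSpl, if_true,
          List.modifyHead_cons]
        simp [hl, pvModifyHead_idfun]
    · have hstep : pvStepA (line, acc) c = (line ++ [c], acc) := by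
        simp [pvStepA, hxc, hc]
      simp only [List.foldl, hstep, pvMain t (line ++ [c]) acc hxt, pvSpl, if_neg hc,
        List.modifyHead_modifyHead]
      have hfg : ((fun x => line ++ x) ∘ fun x => c :: x)
          = fun x : List Char => line ++ [c] ++ x := by
        funext x; simp
      rw [hfg]

-- ===== VERDICT (by name: the statement is the Claim_ definition above) =====
theorem get_busses_spec : Claim_equal_get_busses := by
  intro input _ _
  unfold Spec_get_busses get_busses get_busses_alt
  dsimp only
  rw [PySem.Chars.join_nil_singletons, pvSplitOn_eq]
  have h := pvMain ((((PySem.List.pyGet? input 1).getD "").toList).filter (fun c => c ≠ 'x'))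
      [] [] (by simp)
  rw [pvFoldA_filter]
  simp only [pvFinish] at h
  simpa [pvModifyHead_idfun] using h
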